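-- pv_equiv track=rewrite | github.com/Nemeca99/Lyra_Blackwall_Alpha | research/experiments/Systems/Memory_Systems/kitchen_staff.py | extract_context_tags
-- ===== SOURCE A (Python) =====
-- from typing import Dict, List, Optional, Tuple
--
-- def extract_context_tags(message: str) -> List[str]:
--     """Extract context tags from message content"""
--     # Simple keyword extraction - can be enhanced with NLP
--     keywords = []
--     message_lower = message.lower()
--
--     # Basic context detection
--     if any(word in message_lower for word in ["help", "question", "ask"]):
--         keywords.append("question")
--     if any(word in message_lower for word in ["happy", "excited", "great"]):
--         keywords.append("positive")
--     if any(word in message_lower for word in ["sad", "angry", "frustrated"]):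
--         keywords.append("negative")
--     if any(word in message_lower for word in ["work", "job", "career"]):
--         keywords.append("work")
--     if any(word in message_lower for word in ["game", "play", "fun"]):
--         keywords.append("entertainment")
--
--     return keywords
-- ===== SOURCE B (Python) =====
-- TAG_WORDS = [
--     ("question", ("help", "question", "ask")),
--     ("positive", ("happy", "excited", "great")),
--     ("negative", ("sad", "angry", "frustrated")),
--     ("work", ("work", "job", "career")),
--     ("entertainment", ("game", "play", "fun")),
-- ]
--
-- def extract_context_tags(message: str) -> list:
--     # Single left-to-right scan of the lowered message: at each position test
--     # which keywords start there, collecting their tags in a set; finally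
--     # emit the tags in the table's canonical order.
--     text = message.lower()
--     matched = set()
--     suffix = text
--     while suffix:
--         for tag, words in TAG_WORDS:
--             if tag not in matched and any(suffix.startswith(w) for w in words):
--                 matched.add(tag)
--         suffix = suffix[1:]
--     return [tag for tag, _ in TAG_WORDS if tag in matched]
-- ===== Notes on version B (the rewrite author's own statement) =====
-- stated objective: alternative
-- what changed: Instead of five per-category substring-containment checks over the whole message, B makes a single left-to-right scan of the lowered message, testing at each position which keywords start there and collecting matched tags in a set, then emits tags in canonical table order.
import Mathlib
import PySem

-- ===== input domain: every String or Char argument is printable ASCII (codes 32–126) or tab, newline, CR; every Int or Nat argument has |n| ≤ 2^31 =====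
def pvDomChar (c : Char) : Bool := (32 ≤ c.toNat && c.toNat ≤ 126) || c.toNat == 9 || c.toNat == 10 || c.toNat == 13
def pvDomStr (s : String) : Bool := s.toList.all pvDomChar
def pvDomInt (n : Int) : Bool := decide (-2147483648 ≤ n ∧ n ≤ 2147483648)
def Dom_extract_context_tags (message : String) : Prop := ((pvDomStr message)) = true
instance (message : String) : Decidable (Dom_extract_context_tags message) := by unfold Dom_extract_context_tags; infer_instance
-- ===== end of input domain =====

-- B replaces A's five whole-message substring checks by a single left-to-right scan of the
-- lowered message, collecting at each position the tags whose keywords start there (alternative, same cost).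

-- ===== PORT A =====
def extract_context_tags (message : String) : List String :=
  let message_lower := PySem.Str.lower message
  let keywords : List String := []
  let keywords := if (["help", "question", "ask"]).any (fun word => PySem.Str.isIn word message_lower) then keywords ++ ["question"] else keywords
  let keywords := if (["happy", "excited", "great"]).any (fun word => PySem.Str.isIn word message_lower) then keywords ++ ["positive"] else keywords
  let keywords := if (["sad", "angry", "frustrated"]).any (fun word => PySem.Str.isIn word message_lower) then keywords ++ ["negative"] else keywords
  let keywords := if (["work", "job", "career"]).any (fun word => PySem.Str.isIn word message_lower) then keywords ++ ["work"] else keywords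
  let keywords := if (["game", "play", "fun"]).any (fun word => PySem.Str.isIn word message_lower) then keywords ++ ["entertainment"] else keywords
  keywords

-- ===== PORT B =====
def pvTagWords : List (String × List String) :=
  [ ("question", ["help", "question", "ask"]),
    ("positive", ["happy", "excited", "great"]),
    ("negative", ["sad", "angry", "frustrated"]),
    ("work", ["work", "job", "career"]),
    ("entertainment", ["game", "play", "fun"]) ]

-- the inner `for tag, words in TAG_WORDS: if tag not in matched and any(suffix.startswith(w) …): matched.add(tag)`
def pvStepTags (suffix : List Char) (m : PySem.Set String) : PySem.Set String :=
  pvTagWords.foldl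
    (fun m p =>
      if (!(PySem.Set.contains m p.1) && p.2.any (fun w => PySem.Chars.startswith suffix w.toList)) then
        PySem.Set.add m p.1
      else m) m

-- the `while suffix: …; suffix = suffix[1:]` loop (structural recursion on the char list)
def pvScan : List Char → PySem.Set String → PySem.Set String
  | [], m => m
  | c :: rest, m => pvScan rest (pvStepTags (c :: rest) m)

def extract_context_tags_alt (message : String) : List String :=
  let text := (PySem.Str.lower message).toList
  let matched := pvScan text PySem.Set.empty
  (pvTagWords.filter (fun p => PySem.Set.contains matched p.1)).map (fun p => p.1)

-- ===== PRECONDITION & SPEC =====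
def Spec_extract_context_tags (message : String) (out : List String) : Prop := out = extract_context_tags_alt message
instance (message : String) (out : List String) : Decidable (Spec_extract_context_tags message out) := by unfold Spec_extract_context_tags; infer_instance

-- ===== CLAIM =====
def Claim_equal_extract_context_tags : Prop := ∀ (message : String), Dom_extract_context_tags message → Spec_extract_context_tags message (extract_context_tags message)

-- ===== LEMMAS AND PROOFS =====\n
lemma pv_any_prefix_iff (suffix : List Char) (ws : List String) :
    (∃ w ∈ ws, w.toList <+: suffix) ↔
      (ws.any (fun w => PySem.Chars.startswith suffix w.toList) = true) := by
  simp [List.any_eq_true, PySem.Chars.startswith_iff]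

-- one step of the inner table loop, as a membership fact
lemma pv_step_one (suffix : List Char) (q : String × List String) (m : PySem.Set String) (t : String) :
    t ∈ (if (!(PySem.Set.contains m q.1) && q.2.any (fun w => PySem.Chars.startswith suffix w.toList)) then
            PySem.Set.add m q.1 else m) ↔
      t ∈ m ∨ (q.1 = t ∧ ∃ w ∈ q.2, w.toList <+: suffix) := by
  by_cases hq : (q.2.any (fun w => PySem.Chars.startswith suffix w.toList)) = true
  · cases hB : PySem.Set.contains m q.1 with
    | true =>
      have hm : q.1 ∈ m := (PySem.Set.contains_iff m q.1).mp hB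
      have himp : q.1 = t → t ∈ m := fun h => h ▸ hm
      simp only [Bool.not_true, Bool.false_and, Bool.false_eq_true, if_false]
      tauto
    | false =>
      have hstuff : ∃ w ∈ q.2, w.toList <+: suffix := (pv_any_prefix_iff suffix q.2).mpr hq
      have hsy : t = q.1 ↔ q.1 = t := eq_comm
      simp only [hq, Bool.not_false, Bool.true_and, if_true]
      rw [PySem.Set.mem_add]
      tauto
  · have hnE : ¬ ∃ w ∈ q.2, w.toList <+: suffix :=
      fun h => hq ((pv_any_prefix_iff suffix q.2).mp h)
    have hc : (q.2.any (fun w => PySem.Chars.startswith suffix w.toList)) = false :=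
      Bool.eq_false_iff.mpr hq
    simp only [hc, Bool.and_false, Bool.false_eq_true, if_false]
    constructor
    · exact Or.inl
    · rintro (h | ⟨-, hE⟩)
      · exact h
      · exact absurd hE hnE

lemma mem_pvStepFold (suffix : List Char) (tbl : List (String × List String))
    (m : PySem.Set String) (t : String) :
    t ∈ tbl.foldl
        (fun m p =>
          if (!(PySem.Set.contains m p.1) && p.2.any (fun w => PySem.Chars.startswith suffix w.toList)) then
            PySem.Set.add m p.1
          else m) m ↔
      t ∈ m ∨ ∃ p ∈ tbl, p.1 = t ∧ ∃ w ∈ p.2, w.toList <+: suffix := by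
  induction tbl generalizing m with
  | nil => simp
  | cons q tbl ih =>
    rw [List.foldl_cons, ih, List.exists_mem_cons_iff]
    rw [pv_step_one suffix q m t]
    exact or_assoc

lemma mem_pvStepTags (suffix : List Char) (m : PySem.Set String) (t : String) :
    t ∈ pvStepTags suffix m ↔
      t ∈ m ∨ ∃ p ∈ pvTagWords, p.1 = t ∧ ∃ w ∈ p.2, w.toList <+: suffix :=
  mem_pvStepFold suffix pvTagWords m t

lemma pv_words_ne_nil : ∀ p ∈ pvTagWords, ∀ w ∈ p.2, w.toList ≠ [] := by decide

lemma mem_pvScan (s : List Char) (m : PySem.Set String) (t : String) :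
    t ∈ pvScan s m ↔
      t ∈ m ∨ ∃ p ∈ pvTagWords, p.1 = t ∧ ∃ w ∈ p.2, ∃ j, w.toList <+: s.drop j := by
  induction s generalizing m with
  | nil =>
    simp only [pvScan, List.drop_nil, List.prefix_nil]
    constructor
    · exact Or.inl
    · rintro (h | ⟨p, hp, hpt, w, hw, j, hnil⟩)
      · exact h
      · exact absurd hnil (pv_words_ne_nil p hp w hw)
  | cons c rest ih =>
    show t ∈ pvScan rest (pvStepTags (c :: rest) m) ↔ _
    rw [ih, mem_pvStepTags]
    constructor
    · rintro ((h | ⟨p, hp, hpt, w, hw, hpre⟩) | ⟨p, hp, hpt, w, hw, j, hpre⟩)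
      · exact Or.inl h
      · exact Or.inr ⟨p, hp, hpt, w, hw, 0, hpre⟩
      · exact Or.inr ⟨p, hp, hpt, w, hw, j + 1, hpre⟩
    · rintro (h | ⟨p, hp, hpt, w, hw, j, hpre⟩)
      · exact Or.inl (Or.inl h)
      · cases j with
        | zero => exact Or.inl (Or.inr ⟨p, hp, hpt, w, hw, hpre⟩)
        | succ j => exact Or.inr ⟨p, hp, hpt, w, hw, j, hpre⟩

lemma pvContains_question (text : List Char) :
    PySem.Set.contains (pvScan text PySem.Set.empty) "question"
      = (["help", "question", "ask"] : List String).any (fun w => PySem.Chars.isIn w.toList text) := by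
  rw [Bool.eq_iff_iff, PySem.Set.contains_iff, mem_pvScan]
  simp [pvTagWords, PySem.Set.empty, PySem.Chars.exists_prefix_drop_iff_isIn]

lemma pvContains_positive (text : List Char) :
    PySem.Set.contains (pvScan text PySem.Set.empty) "positive"
      = (["happy", "excited", "great"] : List String).any (fun w => PySem.Chars.isIn w.toList text) := by
  rw [Bool.eq_iff_iff, PySem.Set.contains_iff, mem_pvScan]
  simp [pvTagWords, PySem.Set.empty, PySem.Chars.exists_prefix_drop_iff_isIn]

lemma pvContains_negative (text : List Char) :
    PySem.Set.contains (pvScan text PySem.Set.empty) "negative"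
      = (["sad", "angry", "frustrated"] : List String).any (fun w => PySem.Chars.isIn w.toList text) := by
  rw [Bool.eq_iff_iff, PySem.Set.contains_iff, mem_pvScan]
  simp [pvTagWords, PySem.Set.empty, PySem.Chars.exists_prefix_drop_iff_isIn]

lemma pvContains_work (text : List Char) :
    PySem.Set.contains (pvScan text PySem.Set.empty) "work"
      = (["work", "job", "career"] : List String).any (fun w => PySem.Chars.isIn w.toList text) := by
  rw [Bool.eq_iff_iff, PySem.Set.contains_iff, mem_pvScan]
  simp [pvTagWords, PySem.Set.empty, PySem.Chars.exists_prefix_drop_iff_isIn]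

lemma pvContains_entertainment (text : List Char) :
    PySem.Set.contains (pvScan text PySem.Set.empty) "entertainment"
      = (["game", "play", "fun"] : List String).any (fun w => PySem.Chars.isIn w.toList text) := by
  rw [Bool.eq_iff_iff, PySem.Set.contains_iff, mem_pvScan]
  simp [pvTagWords, PySem.Set.empty, PySem.Chars.exists_prefix_drop_iff_isIn]

-- ===== VERDICT =====
theorem extract_context_tags_spec : Claim_equal_extract_context_tags := by
  intro message _
  unfold Spec_extract_context_tags extract_context_tags extract_context_tags_alt
  simp only [pvTagWords, List.filter_cons, List.filter_nil,
    pvContains_question, pvContains_positive, pvContains_negative, pvContains_work,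
    pvContains_entertainment, PySem.Str.isIn_eq, List.any_cons, List.any_nil]
  split_ifs <;> rfl
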